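-- pv_equiv track=rewrite | github.com/agentmorris/MegaDetector | detection/run_tiled_inference.py | get_patch_boundaries
-- ===== SOURCE A (Python) =====
-- default_patch_overlap = 0.5
--
-- def get_patch_boundaries(image_size,patch_size,patch_stride=None):
--     """
--     Get a list of patch starting coordinates (x,y) given an image size
--     and a stride.  Stride defaults to half the patch size.
--
--     image_size, patch_size, and patch_stride are all represented as [w,h].
--     """
--
--     if patch_stride is None:
--         patch_stride = (round(patch_size[0]*(1.0-default_patch_overlap)),
--                         round(patch_size[1]*(1.0-default_patch_overlap)))
--
--     image_width = image_size[0]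
--     image_height = image_size[1]
--
--     def add_patch_row(patch_start_positions,y_start):
--         """
--         Add one row to our list of patch start positions, i.e.
--         loop over all columns.
--         """
--
--         x_start = 0; x_end = x_start + patch_size[0] - 1
--
--         while(True):
--
--             patch_start_positions.append([x_start,y_start])
--
--             x_start += patch_stride[0]
--             x_end = x_start + patch_size[0] - 1
--
--             if x_end == image_width - 1:
--                 break
--             elif x_end > (image_width - 1):
--                 overshoot = (x_end - image_width) + 1
--                 x_start -= overshoot
--                 x_end = x_start + patch_size[0] - 1
--                 patch_start_positions.append([x_start,y_start])
--                 break
--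
--         # ...for each column
--
--         return patch_start_positions
--
--     patch_start_positions = []
--
--     y_start = 0; y_end = y_start + patch_size[1] - 1
--
--     while(True):
--
--         patch_start_positions = add_patch_row(patch_start_positions,y_start)
--
--         y_start += patch_stride[1]
--         y_end = y_start + patch_size[1] - 1
--
--         if y_end == image_height - 1:
--             break
--         elif y_end > (image_height - 1):
--             overshoot = (y_end - image_height) + 1
--             y_start -= overshoot
--             y_end = y_start + patch_size[1] - 1
--             patch_start_positions = add_patch_row(patch_start_positions,y_start)
--             break
--
--     # ...for each row
--
--     assert patch_start_positions[-1][0]+patch_size[0] == image_width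
--     assert patch_start_positions[-1][1]+patch_size[1] == image_height
--
--     return patch_start_positions
-- ===== SOURCE B (Python) =====
-- default_patch_overlap = 0.5
--
-- def get_patch_boundaries(image_size, patch_size, patch_stride=None):
--     """Same grid of [x, y] patch start positions as before, but computed as a
--     cross product of two 1D start-coordinate lists (one per axis)."""
--
--     if patch_stride is None:
--         patch_stride = (round(patch_size[0]*(1.0-default_patch_overlap)),
--                         round(patch_size[1]*(1.0-default_patch_overlap)))
--
--     def axis_starts(size, patch, stride):
--         # 1D list of start coordinates: 0, stride, 2*stride, ... plus a final
--         # start flush with the far edge when the last patch overshoots.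
--         starts = [0]
--         pos = stride
--         while pos + patch < size:
--             starts.append(pos)
--             pos += stride
--         if pos + patch > size:
--             starts.append(size - patch)
--         return starts
--
--     xs = axis_starts(image_size[0], patch_size[0], patch_stride[0])
--     ys = axis_starts(image_size[1], patch_size[1], patch_stride[1])
--     patch_start_positions = [[x, y] for y in ys for x in xs]
--
--     assert patch_start_positions[-1][0]+patch_size[0] == image_size[0]
--     assert patch_start_positions[-1][1]+patch_size[1] == image_size[1]
--
--     return patch_start_positions
-- ===== Notes on version B (the rewrite author's own statement) =====
-- stated objective: simpler
-- what changed: A's nested while-loops with an inner row-appending closure are replaced by one 1D helper that computes the start coordinates for a single axis, called once per axis, with the grid built as a cross product comprehension (y-outer, x-inner).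
import Mathlib
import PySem

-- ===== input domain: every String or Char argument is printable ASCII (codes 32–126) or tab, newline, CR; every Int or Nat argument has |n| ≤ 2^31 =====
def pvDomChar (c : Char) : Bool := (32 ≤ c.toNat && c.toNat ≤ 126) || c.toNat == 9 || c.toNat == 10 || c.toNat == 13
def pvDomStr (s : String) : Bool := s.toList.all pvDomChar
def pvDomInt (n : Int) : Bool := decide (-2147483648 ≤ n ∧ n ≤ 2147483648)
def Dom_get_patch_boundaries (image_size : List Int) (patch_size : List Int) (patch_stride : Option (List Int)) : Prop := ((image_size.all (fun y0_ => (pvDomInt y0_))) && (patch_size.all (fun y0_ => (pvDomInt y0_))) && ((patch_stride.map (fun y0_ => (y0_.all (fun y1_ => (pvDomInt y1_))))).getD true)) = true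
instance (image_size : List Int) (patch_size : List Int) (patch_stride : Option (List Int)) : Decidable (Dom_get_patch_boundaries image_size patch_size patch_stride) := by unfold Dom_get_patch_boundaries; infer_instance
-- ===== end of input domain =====

-- B recomputes the same grid as A but as a cross product of two 1D start lists (one per axis);
-- equivalence is about the return value, and Pre_ excludes exactly the inputs where Python A
-- raises (short lists → IndexError, exact-fit/degenerate strides → AssertionError) or loops forever.

-- round(p*0.5) for an int p (exact on |p| ≤ 2^31: p*0.5 is an exact half-integer float,
-- Python rounds halves to even).  Shared by both ports: both Pythons contain this line.
def pyRoundHalf (p : Int) : Int :=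
  if p % 2 = 0 then p / 2
  else
    let q := PySem.Int.floordiv p 2
    if q % 2 = 0 then q else q + 1

-- stride resolution (identical lines in both Pythons): given stride, else round(patch*0.5)
def pvStrideX (patch_size : List Int) (patch_stride : Option (List Int)) : Int :=
  match patch_stride with
  | none => pyRoundHalf ((PySem.List.pyGet? patch_size 0).getD 0)
  | some st => (PySem.List.pyGet? st 0).getD 0

def pvStrideY (patch_size : List Int) (patch_stride : Option (List Int)) : Int :=
  match patch_stride with
  | none => pyRoundHalf ((PySem.List.pyGet? patch_size 1).getD 0)
  | some st => (PySem.List.pyGet? st 1).getD 0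

-- ===== PORT A =====
-- A's inner `while True` column loop (fuel only bounds the recursion; on every input
-- admitted by Pre_ the loop breaks before the fuel runs out)
def pvArowA (w p s y : Int) (acc : List (List Int)) (x_start : Int) (fuel : Nat) : List (List Int) :=
  let acc1 := acc ++ [[x_start, y]]
  let x1 := x_start + s
  let x_end := x1 + p - 1
  if x_end = w - 1 then acc1
  else if x_end > w - 1 then
    let overshoot := (x_end - w) + 1
    acc1 ++ [[x1 - overshoot, y]]
  else
    match fuel with
    | 0 => acc1
    | Nat.succ f => pvArowA w p s y acc1 x1 f

-- A's outer `while True` row loop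
def pvAyA (w h px py sx sy : Int) (xfuel : Nat) (acc : List (List Int)) (y_start : Int) (fuel : Nat) : List (List Int) :=
  let acc1 := pvArowA w px sx y_start acc 0 xfuel
  let y1 := y_start + sy
  let y_end := y1 + py - 1
  if y_end = h - 1 then acc1
  else if y_end > h - 1 then
    let overshoot := (y_end - h) + 1
    pvArowA w px sx (y1 - overshoot) acc1 0 xfuel
  else
    match fuel with
    | 0 => acc1
    | Nat.succ f => pvAyA w h px py sx sy xfuel acc1 y1 f

-- the `.getD 0` on the list reads and the dropped trailing asserts are unreachable/IndexError
-- /AssertionError cases, all excluded by Pre_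
def get_patch_boundaries (image_size : List Int) (patch_size : List Int) (patch_stride : Option (List Int)) : List (List Int) :=
  let sx := pvStrideX patch_size patch_stride
  let sy := pvStrideY patch_size patch_stride
  let image_width := (PySem.List.pyGet? image_size 0).getD 0
  let image_height := (PySem.List.pyGet? image_size 1).getD 0
  let px := (PySem.List.pyGet? patch_size 0).getD 0
  let py := (PySem.List.pyGet? patch_size 1).getD 0
  pvAyA image_width image_height px py sx sy ((image_width - px).toNat + 2) [] 0
    ((image_height - py).toNat + 2)

-- ===== PORT B =====
-- B's 1D `while pos + patch < size` loop, then one flush-to-edge start on overshoot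
def pvAxisLoop (size patch stride : Int) (starts : List Int) (pos : Int) (fuel : Nat) : List Int :=
  if pos + patch < size then
    match fuel with
    | 0 => starts
    | Nat.succ f => pvAxisLoop size patch stride (starts ++ [pos]) (pos + stride) f
  else if pos + patch > size then starts ++ [size - patch]
  else starts

def pvAxisStarts (size patch stride : Int) (fuel : Nat) : List Int :=
  pvAxisLoop size patch stride [0] stride fuel

def get_patch_boundaries_alt (image_size : List Int) (patch_size : List Int) (patch_stride : Option (List Int)) : List (List Int) :=
  let sx := pvStrideX patch_size patch_stride
  let sy := pvStrideY patch_size patch_stride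
  let image_width := (PySem.List.pyGet? image_size 0).getD 0
  let image_height := (PySem.List.pyGet? image_size 1).getD 0
  let px := (PySem.List.pyGet? patch_size 0).getD 0
  let py := (PySem.List.pyGet? patch_size 1).getD 0
  let xs := pvAxisStarts image_width px sx ((image_width - px).toNat + 2)
  let ys := pvAxisStarts image_height py sy ((image_height - py).toNat + 2)
  ys.flatMap (fun y => xs.map (fun x => [x, y]))

-- ===== PRECONDITION & SPEC =====
-- the 1D loop over (size w, patch p, stride s) returns without tripping the trailing assert
-- iff it breaks via the overshoot branch (or the stride-0 exact-cover corner):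
def pvOkAxis (w p s : Int) : Bool :=
  if 0 < s then !(decide (s ≤ w - p) && decide ((w - p) % s = 0))
  else if s = 0 then decide (w ≤ p)
  else decide (w < s + p)

-- Pre_ = exactly the inputs where Python A returns normally: both size lists (and the stride,
-- if given) have ≥ 2 entries (else IndexError) and each axis breaks via overshoot (an exact
-- grid fit makes A's `x_end == image_width - 1` break skip the final start and the trailing
-- assert raise AssertionError; a non-positive stride that never reaches the edge loops forever).
def Pre_get_patch_boundaries (image_size : List Int) (patch_size : List Int) (patch_stride : Option (List Int)) : Prop :=
  2 ≤ image_size.length ∧ 2 ≤ patch_size.length ∧ 2 ≤ (patch_stride.getD [0, 0]).length ∧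
  pvOkAxis ((PySem.List.pyGet? image_size 0).getD 0) ((PySem.List.pyGet? patch_size 0).getD 0)
    (pvStrideX patch_size patch_stride) = true ∧
  pvOkAxis ((PySem.List.pyGet? image_size 1).getD 0) ((PySem.List.pyGet? patch_size 1).getD 0)
    (pvStrideY patch_size patch_stride) = true

instance (image_size : List Int) (patch_size : List Int) (patch_stride : Option (List Int)) : Decidable (Pre_get_patch_boundaries image_size patch_size patch_stride) := by unfold Pre_get_patch_boundaries; infer_instance

def pvWitness_get_patch_boundaries : List Int × List Int × Option (List Int) :=
  ([100, 100], [50, 50], some [30, 30])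

def Spec_get_patch_boundaries (image_size : List Int) (patch_size : List Int) (patch_stride : Option (List Int)) (out : List (List Int)) : Prop := out = get_patch_boundaries_alt image_size patch_size patch_stride
instance (image_size : List Int) (patch_size : List Int) (patch_stride : Option (List Int)) (out : List (List Int)) : Decidable (Spec_get_patch_boundaries image_size patch_size patch_stride out) := by unfold Spec_get_patch_boundaries; infer_instance

-- ===== CLAIM (what is proved, stated in full; the proofs are below) =====
def Claim_equal_get_patch_boundaries : Prop := ∀ (image_size : List Int) (patch_size : List Int) (patch_stride : Option (List Int)), Dom_get_patch_boundaries image_size patch_size patch_stride → Pre_get_patch_boundaries image_size patch_size patch_stride → Spec_get_patch_boundaries image_size patch_size patch_stride (get_patch_boundaries image_size patch_size patch_stride)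

-- ===== LEMMAS AND PROOFS =====

theorem pvAxisLoop_acc (size patch stride : Int) :
    ∀ (fuel : Nat) (pos : Int) (starts : List Int),
      pvAxisLoop size patch stride starts pos fuel
        = starts ++ pvAxisLoop size patch stride [] pos fuel := by
  intro fuel
  induction fuel with
  | zero =>
    intro pos starts
    by_cases h1 : pos + patch < size
    · simp [pvAxisLoop, h1]
    · by_cases h2 : pos + patch > size <;> simp [pvAxisLoop, h1, h2]
  | succ f ih =>
    intro pos starts
    by_cases h1 : pos + patch < size
    · simp only [pvAxisLoop, if_pos h1]
      rw [ih, ih (pos + stride) ([] ++ [pos])]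
      simp
    · by_cases h2 : pos + patch > size <;> simp [pvAxisLoop, h1, h2]

theorem pvAxisLoop_cons (size patch stride : Int) (a pos : Int) (fuel : Nat) :
    pvAxisLoop size patch stride [a] pos fuel
      = a :: pvAxisLoop size patch stride [] pos fuel := by
  rw [pvAxisLoop_acc]
  simp

theorem pvArowA_eq (w p s y : Int) :
    ∀ (fuel : Nat) (x : Int) (acc : List (List Int)),
      pvArowA w p s y acc x fuel
        = acc ++ ([x] ++ pvAxisLoop w p s [] (x + s) fuel).map (fun t => [t, y]) := by
  intro fuel
  induction fuel with
  | zero =>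
    intro x acc
    simp only [pvArowA, pvAxisLoop]
    rcases lt_trichotomy (x + s + p) w with h | h | h
    · rw [if_neg (by omega), if_neg (by omega), if_pos (by omega)]
      simp
    · rw [if_pos (by omega), if_neg (by omega), if_neg (by omega)]
      simp
    · rw [if_neg (by omega), if_pos (by omega), if_neg (by omega), if_pos (by omega)]
      have : x + s - (x + s + p - 1 - w + 1) = w - p := by omega
      simp [this]
  | succ f ih =>
    intro x acc
    simp only [pvArowA, pvAxisLoop]
    rcases lt_trichotomy (x + s + p) w with h | h | h
    · rw [if_neg (by omega), if_neg (by omega), if_pos (by omega)]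
      rw [ih]
      simp [pvAxisLoop_cons]
    · rw [if_pos (by omega), if_neg (by omega), if_neg (by omega)]
      simp
    · rw [if_neg (by omega), if_pos (by omega), if_neg (by omega), if_pos (by omega)]
      have : x + s - (x + s + p - 1 - w + 1) = w - p := by omega
      simp [this]

theorem pvArowA_zero (w p s y : Int) (acc : List (List Int)) (fuel : Nat) :
    pvArowA w p s y acc 0 fuel
      = acc ++ (pvAxisStarts w p s fuel).map (fun t => [t, y]) := by
  rw [pvArowA_eq]
  simp [pvAxisStarts, pvAxisLoop_cons]

theorem pvAyA_eq (w h px py sx sy : Int) (xfuel : Nat) :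
    ∀ (fuel : Nat) (y : Int) (acc : List (List Int)),
      pvAyA w h px py sx sy xfuel acc y fuel
        = acc ++ ([y] ++ pvAxisLoop h py sy [] (y + sy) fuel).flatMap
            (fun yy => (pvAxisStarts w px sx xfuel).map (fun xx => [xx, yy])) := by
  intro fuel
  induction fuel with
  | zero =>
    intro y acc
    simp only [pvAyA, pvAxisLoop, pvArowA_zero]
    rcases lt_trichotomy (y + sy + py) h with hc | hc | hc
    · rw [if_neg (by omega), if_neg (by omega), if_pos (by omega)]
      simp
    · rw [if_pos (by omega), if_neg (by omega), if_neg (by omega)]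
      simp
    · rw [if_neg (by omega), if_pos (by omega), if_neg (by omega), if_pos (by omega)]
      have : y + sy - (y + sy + py - 1 - h + 1) = h - py := by omega
      simp [this]
  | succ f ih =>
    intro y acc
    simp only [pvAyA, pvAxisLoop, pvArowA_zero]
    rcases lt_trichotomy (y + sy + py) h with hc | hc | hc
    · rw [if_neg (by omega), if_neg (by omega), if_pos (by omega)]
      rw [ih]
      simp [pvAxisLoop_cons]
    · rw [if_pos (by omega), if_neg (by omega), if_neg (by omega)]
      simp
    · rw [if_neg (by omega), if_pos (by omega), if_neg (by omega), if_pos (by omega)]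
      have : y + sy - (y + sy + py - 1 - h + 1) = h - py := by omega
      simp [this]

-- the two ports agree on every input (the fuel bounds are the same closed expressions)
theorem pv_ports_eq (image_size : List Int) (patch_size : List Int) (patch_stride : Option (List Int)) :
    get_patch_boundaries image_size patch_size patch_stride
      = get_patch_boundaries_alt image_size patch_size patch_stride := by
  simp only [get_patch_boundaries, get_patch_boundaries_alt]
  rw [pvAyA_eq]
  have : (0 : Int) + pvStrideY patch_size patch_stride = pvStrideY patch_size patch_stride := by ring
  rw [this]
  simp [pvAxisStarts, pvAxisLoop_cons]

-- ===== VERDICT (by name: the statement is the Claim_ definition above) =====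
theorem get_patch_boundaries_spec : Claim_equal_get_patch_boundaries := by
  intro image_size patch_size patch_stride _ _
  unfold Spec_get_patch_boundaries
  exact pv_ports_eq image_size patch_size patch_stride
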